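-- pv_equiv track=rewrite | github.com/ZiganshinIB/GB_start_Python | Task/t18.py | find_all_nearby
-- ===== SOURCE A (Python) =====
-- def find_all_nearby(array: list, value: int) -> dict:
--     """
--     Hello world ☻
--     :param array: List
--     :param value:  Find value
--     :return: {index: item}
--     """
--     nearby: dict = {}
--     sub_arr: list = [abs(item - value) for item in array]
--     min_len = min(sub_arr)
--     for index in range(len(sub_arr)):
--         if min_len == sub_arr[index]:
--             nearby[index] = array[index]
--     return nearby
-- ===== SOURCE B (Python) =====
-- def find_all_nearby(array: list, value: int) -> dict:
--     best = None
--     nearby = {}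
--     for index, item in enumerate(array):
--         d = abs(item - value)
--         if best is None or d < best:
--             best = d
--             nearby = {index: item}
--         elif d == best:
--             nearby[index] = item
--     return nearby
-- ===== Notes on version B (the rewrite author's own statement) =====
-- stated objective: alternative
-- what changed: Replaces A's two-pass scheme (materialise all distances, take min, then rescan by index) with a single enumerate pass keeping a running best distance and resetting/extending the result dict in place.
import Mathlib
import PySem

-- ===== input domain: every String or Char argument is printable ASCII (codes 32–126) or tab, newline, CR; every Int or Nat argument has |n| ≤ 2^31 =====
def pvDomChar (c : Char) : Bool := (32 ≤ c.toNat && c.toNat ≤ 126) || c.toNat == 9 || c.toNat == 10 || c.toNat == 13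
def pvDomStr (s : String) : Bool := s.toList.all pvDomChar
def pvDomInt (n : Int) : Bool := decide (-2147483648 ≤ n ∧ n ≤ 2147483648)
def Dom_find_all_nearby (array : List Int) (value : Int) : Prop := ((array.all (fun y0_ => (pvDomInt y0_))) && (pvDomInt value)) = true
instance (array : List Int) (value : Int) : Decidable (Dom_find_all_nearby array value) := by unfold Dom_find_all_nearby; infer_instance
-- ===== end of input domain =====

-- B replaces A's two-pass scheme (distance list + min + index rescan) by one streaming pass
-- keeping a running best distance; equivalence is proved for nonempty arrays (A raises on []).

-- ===== PORT A =====
def find_all_nearby (array : List Int) (value : Int) : List (Int × Int) :=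
  let sub_arr : List Int := array.map (fun item => |item - value|)
  match PySem.List.min? sub_arr (fun x => x) with
  | none => []   -- Python: min([]) raises ValueError; excluded by Pre_
  | some min_len =>
    ((PySem.List.pyRange 0 (sub_arr.length : Int) 1).foldl
      (fun nearby index =>
        if min_len = PySem.List.pyGetD sub_arr index 0
        then nearby.insert index (PySem.List.pyGetD array index 0)
        else nearby)
      PySem.Dict.empty).items

-- ===== PORT B =====
def altLoop (value : Int) : List (Int × Int) → Option Int → PySem.Dict Int Int → PySem.Dict Int Int
  | [], _, nearby => nearby
  | (i, item) :: rest, best, nearby =>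
    let d := |item - value|
    match best with
    | none => altLoop value rest (some d) (PySem.Dict.empty.insert i item)
    | some b =>
      if d < b then altLoop value rest (some d) (PySem.Dict.empty.insert i item)
      else if d = b then altLoop value rest (some b) (nearby.insert i item)
      else altLoop value rest (some b) nearby

def find_all_nearby_alt (array : List Int) (value : Int) : List (Int × Int) :=
  (altLoop value (PySem.List.enumerate array 0) none PySem.Dict.empty).items

-- ===== PRECONDITION & SPEC =====
-- Pre_ excludes exactly the empty array, on which A raises ValueError (min of empty sequence).
def Pre_find_all_nearby (array : List Int) (value : Int) : Prop := array ≠ []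
instance (array : List Int) (value : Int) : Decidable (Pre_find_all_nearby array value) := by unfold Pre_find_all_nearby; infer_instance
def pvWitness_find_all_nearby : List Int × Int := ([3, 7, 5, 3], 4)

-- (On the excluded empty array the Python A raises ValueError while the Python B returns {}.)
def Spec_find_all_nearby (array : List Int) (value : Int) (out : List (Int × Int)) : Prop := out = find_all_nearby_alt array value
instance (array : List Int) (value : Int) (out : List (Int × Int)) : Decidable (Spec_find_all_nearby array value out) := by unfold Spec_find_all_nearby; infer_instance

-- ===== CLAIM (what is proved, stated in full; the proofs are below) =====
def Claim_equal_find_all_nearby : Prop := ∀ (array : List Int) (value : Int), Dom_find_all_nearby array value → Pre_find_all_nearby array value → Spec_find_all_nearby array value (find_all_nearby array value)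

-- ===== LEMMAS AND PROOFS =====

-- A on a nonempty array: the indices of minimal distance, filtered out of range(len) and paired with their elements.
theorem A_char (a value : Int) (t : List Int) :
    find_all_nearby (a :: t) value =
      ((PySem.List.pyRange 0 (((a :: t).length : Nat) : Int) 1).filter
          (fun i => decide ((List.foldl min (|a - value|) (t.map (fun item => |item - value|))) = PySem.List.pyGetD ((a :: t).map (fun item => |item - value|)) i 0))).map
        (fun i => (i, PySem.List.pyGetD (a :: t) i 0)) := by
  show (match PySem.List.min? ((a :: t).map (fun item => |item - value|)) (fun x => x) with
    | none => []
    | some min_len =>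
      ((PySem.List.pyRange 0 ((((a :: t).map (fun item => |item - value|)).length : Nat) : Int) 1).foldl
        (fun (nearby : PySem.Dict Int Int) index =>
          if min_len = PySem.List.pyGetD ((a :: t).map (fun item => |item - value|)) index 0
          then nearby.insert index (PySem.List.pyGetD (a :: t) index 0)
          else nearby)
        PySem.Dict.empty).items) = _
  rw [show PySem.List.min? ((a :: t).map (fun item => |item - value|)) (fun x => x)
        = some (List.foldl min (|a - value|) (t.map (fun item => |item - value|))) from by
      rw [List.map_cons, PySem.List.min?_id_cons]]
  change (List.foldl _ PySem.Dict.empty _).items = _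
  rw [PySem.List.foldl_ite_eq_foldl_filter]
  rw [PySem.Dict.items_foldl_insert_fresh _ (fun i => i) (fun i => PySem.List.pyGetD (a :: t) i 0) _ (by simp) ?_]
  · simp [PySem.Dict.empty]
  · rw [List.map_id']
    apply List.Nodup.filter
    rw [List.length_map, PySem.List.pyRange_zero_natCast]
    exact List.nodup_range.map (fun x y h => by exact_mod_cast h)

-- Invariant of B's streaming loop: with running best b, the result keeps the accumulated dict
-- exactly when b stays the overall minimum, and appends every later pair at minimal distance.
set_option maxRecDepth 8192 in
theorem altLoop_items (value : Int) :
    ∀ (l : List Int) (s b : Int) (nearby : PySem.Dict Int Int),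
      (∀ k ∈ nearby.keys, k < s) →
      (altLoop value (PySem.List.enumerate l s) (some b) nearby).items =
        (if b = (l.map (fun x => |x - value|)).foldl min b then nearby.items else [])
          ++ ((PySem.List.enumerate l s).filter
                (fun p => decide (|p.2 - value| = (l.map (fun x => |x - value|)).foldl min b))) := by
  intro l
  induction l with
  | nil => intro s b nearby h; simp [altLoop, PySem.List.enumerate_nil]
  | cons x l ih =>
    intro s b nearby h
    rw [PySem.List.enumerate_cons]
    show (altLoop value ((s, x) :: PySem.List.enumerate l (s + 1)) (some b) nearby).items = _
    simp only [altLoop]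
    have hmin : ((x :: l).map (fun y => |y - value|)).foldl min b
        = (l.map (fun y => |y - value|)).foldl min (min b (|x - value|)) := by
      simp [List.foldl_cons]
    by_cases hd : |x - value| < b
    · -- reset: strictly better distance
      have hmb : min b (|x - value|) = |x - value| := by omega
      rw [if_pos hd, ih (s + 1) (|x - value|) _ ?hk, hmin, hmb, List.filter_cons]
      case hk =>
        intro k hk
        rcases (PySem.Dict.mem_keys_insert _ _ _ _).1 hk with rfl | hk
        · omega
        · simp [PySem.Dict.empty, PySem.Dict.keys] at hk
      have hle := (PySem.List.foldl_min_le (l.map (fun y => |y - value|)) (|x - value|)).1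
      have hins : (PySem.Dict.empty.insert s x : PySem.Dict Int Int).items = [(s, x)] := rfl
      clear ih h
      rw [if_neg (show ¬ b = List.foldl min |x - value| (List.map (fun y => |y - value|) l) by omega)]
      by_cases hx : |x - value| = List.foldl min |x - value| (List.map (fun y => |y - value|) l)
      · rw [hins, if_pos hx, if_pos (by simpa using hx)]
        try simp
      · rw [if_neg hx, if_neg (by simpa using hx)]
        try simp
    · rw [if_neg hd]
      have hmb : min b (|x - value|) = b := by omega
      by_cases he : |x - value| = b
      · -- tie: append to nearby
        rw [if_pos he, ih (s + 1) b _ ?hk2, hmin, hmb, List.filter_cons]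
        case hk2 =>
          intro k hk
          rcases (PySem.Dict.mem_keys_insert _ _ _ _).1 hk with rfl | hk
          · omega
          · exact lt_trans (h k hk) (by omega)
        have hnc : nearby.contains s = false := by
          rw [← Bool.not_eq_true, PySem.Dict.contains_iff_mem_keys]
          intro hm; exact absurd (h s hm) (lt_irrefl s)
        rw [PySem.Dict.items_insert_of_not_contains _ _ hnc]
        clear ih h
        by_cases hbm : b = List.foldl min b (List.map (fun y => |y - value|) l)
        · simp only [if_pos hbm, if_pos (show (decide (|((s : Int), x).2 - value| = List.foldl min b (List.map (fun y => |y - value|) l))) = true by simp [he, ← hbm])]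
          try simp
        · simp only [if_neg hbm, if_neg (show ¬ (decide (|((s : Int), x).2 - value| = List.foldl min b (List.map (fun y => |y - value|) l))) = true by simpa [he] using hbm)]
          try simp
      · -- worse distance: skip
        rw [if_neg he, ih (s + 1) b _ (fun k hk => lt_trans (h k hk) (by omega)), hmin, hmb,
            List.filter_cons]
        have hle := (PySem.List.foldl_min_le (l.map (fun y => |y - value|)) b).1
        clear ih h
        rw [if_neg (show ¬ (decide (|((s : Int), x).2 - value| = List.foldl min b (List.map (fun y => |y - value|) l))) = true by simp; omega)]

-- B on a nonempty array: the enumerated pairs at minimal distance, in order.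
theorem B_char (a value : Int) (t : List Int) :
    find_all_nearby_alt (a :: t) value =
      (PySem.List.enumerate (a :: t) 0).filter
        (fun p => decide (|p.2 - value| = (t.map (fun x => |x - value|)).foldl min (|a - value|))) := by
  show (altLoop value (PySem.List.enumerate (a :: t) 0) none PySem.Dict.empty).items = _
  rw [PySem.List.enumerate_cons]
  show (altLoop value (PySem.List.enumerate t (0 + 1)) (some (|a - value|))
      (PySem.Dict.empty.insert 0 a)).items = _
  norm_num
  rw [altLoop_items value t 1 (|a - value|) _ ?hk]
  case hk =>
    intro k hk
    rcases (PySem.Dict.mem_keys_insert _ _ _ _).1 hk with rfl | hk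
    · omega
    · simp [PySem.Dict.empty, PySem.Dict.keys] at hk
  rw [List.filter_cons]
  by_cases hx : |a - value| = (t.map (fun x => |x - value|)).foldl min (|a - value|)
  · rw [if_pos hx, if_pos (by simpa using hx)]
    rfl
  · rw [if_neg hx, if_neg (by simpa using hx)]
    rfl

theorem AB_eq_cons (a value : Int) (t : List Int) :
    find_all_nearby (a :: t) value = find_all_nearby_alt (a :: t) value := by
  rw [A_char, B_char]
  rw [PySem.List.enumerate_eq_map_pyRange (a :: t) 0, List.filter_map]
  congr 1
  apply List.filter_congr
  intro j hj
  have hj' := PySem.List.mem_pyRange_one.1 hj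
  have h1 : PySem.List.pyGetD ((a :: t).map (fun item => |item - value|)) j 0
      = |PySem.List.pyGetD (a :: t) j 0 - value| := by
    rw [PySem.List.pyGetD_eq_getElem _ 0 hj'.1 (by simpa using hj'.2),
        PySem.List.pyGetD_eq_getElem _ 0 hj'.1 (by simpa [PySem.List.len] using hj'.2)]
    simp only [List.getElem_map]
  simp only [Function.comp, h1]
  exact (decide_eq_decide.2 eq_comm)

-- ===== VERDICT (by name: the statement is the Claim_ definition above) =====
theorem find_all_nearby_spec : Claim_equal_find_all_nearby := by
  intro array value _ hpre
  unfold Spec_find_all_nearby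
  cases array with
  | nil => exact absurd rfl hpre
  | cons a t => exact AB_eq_cons a value t
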